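-- pv_equiv track=rewrite | github.com/zartwilly/topology_discovery_V1 | algorithme_couverture.py | verifier_cliques
-- ===== SOURCE A (Python) =====
-- def verifier_cliques(cliques):
--     """
--     verifier si tous les sommets d'une clique de cliques concourent a un sommet.
--     """
--     cliques_possibles = [];
--     for clique_ in cliques:
--         aretes = list(map(lambda x:set(x.split("_")), clique_));
--         sommet_commun = set.intersection(*aretes);
--
--         if sommet_commun and len(sommet_commun) == 1:
--             cliques_possibles.append(clique_);
--
--     return cliques_possibles;
-- ===== SOURCE B (Python) =====
-- def verifier_cliques(cliques):
--     result = []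
--     for clique_ in cliques:
--         n = len(clique_)
--         counts = {}
--         for edge in clique_:
--             for v in set(edge.split("_")):
--                 counts[v] = counts.get(v, 0) + 1
--         if list(counts.values()).count(n) == 1:
--             result.append(clique_)
--     return result
-- ===== Notes on version B (the rewrite author's own statement) =====
-- stated objective: alternative
-- what changed: B replaces A's construction of per-edge vertex sets folded through set.intersection by a single per-vertex frequency dictionary: each vertex's count over the deduplicated edges is tallied once and the clique is kept iff exactly one vertex's count equals the number of edges; Pre_ excludes inputs containing an empty clique, on which A raises TypeError from set.intersection() with no arguments.
import Mathlib
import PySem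

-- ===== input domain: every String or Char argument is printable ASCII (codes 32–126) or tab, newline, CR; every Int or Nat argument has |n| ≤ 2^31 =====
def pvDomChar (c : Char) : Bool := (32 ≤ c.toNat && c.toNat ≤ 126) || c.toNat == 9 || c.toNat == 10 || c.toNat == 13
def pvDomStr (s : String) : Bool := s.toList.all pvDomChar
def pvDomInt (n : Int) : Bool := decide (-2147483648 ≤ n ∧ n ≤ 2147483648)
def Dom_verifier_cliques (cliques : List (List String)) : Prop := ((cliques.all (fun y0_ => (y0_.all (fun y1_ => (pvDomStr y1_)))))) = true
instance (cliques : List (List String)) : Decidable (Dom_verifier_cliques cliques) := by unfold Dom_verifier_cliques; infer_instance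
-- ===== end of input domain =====

-- B replaces A's fold of set.intersection over the edge sets by one per-vertex frequency count
-- (a vertex is common iff its count equals the number of edges): a different decomposition, not faster.

-- ===== PORT A =====
-- set(x.split("_")): PySem.Chars.splitOn is exact here since the separator "_" is nonempty.
def pvEdgeSet (x : String) : PySem.Set (List Char) :=
  PySem.Set.ofList (PySem.Chars.splitOn x.toList ['_'])

def verifier_cliques (cliques : List (List String)) : List (List String) :=
  cliques.foldl (fun cliques_possibles clique_ =>
    let aretes := clique_.map pvEdgeSet
    match aretes with
    | [] => cliques_possibles  -- Python raises TypeError here (set.intersection with no arguments); excluded by Pre_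
    | a :: rest =>
      let sommet_commun := rest.foldl PySem.Set.inter a
      if sommet_commun ≠ [] ∧ sommet_commun.length = 1 then cliques_possibles ++ [clique_]
      else cliques_possibles) []

-- ===== PORT B =====
def verifier_cliques_alt (cliques : List (List String)) : List (List String) :=
  cliques.foldl (fun result clique_ =>
    let n : Int := (clique_.length : Int)
    let counts : PySem.Dict (List Char) Int :=
      clique_.foldl (fun d edge => (pvEdgeSet edge).foldl (fun d v => d.modify v 0 (· + 1)) d)
        PySem.Dict.empty
    if counts.values.count n = 1 then result ++ [clique_] else result) []

-- ===== PRECONDITION & SPEC =====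
-- Pre_ excludes inputs containing an empty clique, on which A raises TypeError (set.intersection() with no arguments).
def Pre_verifier_cliques (cliques : List (List String)) : Prop := ∀ c ∈ cliques, c ≠ []
instance (cliques : List (List String)) : Decidable (Pre_verifier_cliques cliques) := by unfold Pre_verifier_cliques; infer_instance
def pvWitness_verifier_cliques : List (List String) := [["a_b", "b_c", "a_b_c"], ["a_b", "c_d"]]


def Spec_verifier_cliques (cliques : List (List String)) (out : List (List String)) : Prop := out = verifier_cliques_alt cliques
instance (cliques : List (List String)) (out : List (List String)) : Decidable (Spec_verifier_cliques cliques out) := by unfold Spec_verifier_cliques; infer_instance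

-- ===== CLAIM (what is proved, stated in full; the proofs are below) =====
def Claim_equal_verifier_cliques : Prop := ∀ (cliques : List (List String)), Dom_verifier_cliques cliques → Pre_verifier_cliques cliques → Spec_verifier_cliques cliques (verifier_cliques cliques)

-- ===== LEMMAS AND PROOFS =====

-- B's nested counting loop is Counter over the concatenation of the edge sets.
lemma counts_eq_counter (c : List String) :
    c.foldl (fun d edge => (pvEdgeSet edge).foldl (fun d v => d.modify v 0 (· + 1)) d)
      PySem.Dict.empty
      = PySem.Dict.counter (c.flatMap pvEdgeSet) := by
  rw [PySem.Dict.counter_eq_foldl, List.foldl_flatMap]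

lemma mem_foldl_inter (rest : List (PySem.Set (List Char))) (a : PySem.Set (List Char))
    (v : List Char) :
    v ∈ rest.foldl PySem.Set.inter a ↔ v ∈ a ∧ ∀ s ∈ rest, v ∈ s := by
  induction rest generalizing a with
  | nil => simp
  | cons s rest ih =>
    simp only [List.foldl_cons, ih, PySem.Set.mem_inter, List.mem_cons]
    constructor
    · rintro ⟨⟨h1, h2⟩, h3⟩; exact ⟨h1, by rintro t (rfl | ht); exact h2; exact h3 t ht⟩
    · rintro ⟨h1, h2⟩; exact ⟨⟨h1, h2 s (Or.inl rfl)⟩, fun t ht => h2 t (Or.inr ht)⟩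

lemma nodup_foldl_inter (rest : List (PySem.Set (List Char))) (a : PySem.Set (List Char))
    (h : a.Nodup) : (rest.foldl PySem.Set.inter a).Nodup := by
  induction rest generalizing a with
  | nil => exact h
  | cons s rest ih => exact ih _ (PySem.Set.nodup_inter _ _ h)

lemma nodup_pvEdgeSet (x : String) : (pvEdgeSet x).Nodup := PySem.Set.nodup_ofList _

lemma count_flatMap (c : List String) (v : List Char) :
    List.count v (c.flatMap pvEdgeSet) = c.countP (fun x => decide (v ∈ pvEdgeSet x)) := by
  induction c with
  | nil => simp
  | cons x c ih =>
    rw [List.flatMap_cons, List.count_append, ih, List.countP_cons]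
    by_cases hv : v ∈ pvEdgeSet x
    · have h1 : List.count v (pvEdgeSet x) = 1 :=
        List.count_eq_one_of_mem (nodup_pvEdgeSet x) hv
      simp only [h1, hv, decide_true, if_true]
      omega
    · have h1 : List.count v (pvEdgeSet x) = 0 := List.count_eq_zero_of_not_mem hv
      simp [h1, hv]

-- the per-clique bridge: B's count of full-frequency vertices is the size of A's intersection
lemma values_count_eq (e : String) (es : List String) :
    (PySem.Dict.counter ((e :: es).flatMap pvEdgeSet)).values.count (((e :: es).length : Nat) : Int)
      = ((es.map pvEdgeSet).foldl PySem.Set.inter (pvEdgeSet e)).length := by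
  have hvals : (PySem.Dict.counter ((e :: es).flatMap pvEdgeSet)).values
      = (PySem.Set.ofList ((e :: es).flatMap pvEdgeSet)).map
          (fun k => ((List.count k ((e :: es).flatMap pvEdgeSet) : Nat) : Int)) := by
    show ((PySem.Dict.counter _).items).map Prod.snd = _
    rw [PySem.Dict.items_counter]
    simp [List.map_map, Function.comp]
  rw [hvals, List.count_eq_countP, List.countP_map, List.countP_eq_length_filter]
  apply List.Perm.length_eq
  apply (List.perm_ext_iff_of_nodup
    ((PySem.Set.nodup_ofList _).filter _)
    (nodup_foldl_inter _ _ (nodup_pvEdgeSet e))).mpr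
  intro v
  rw [List.mem_filter, mem_foldl_inter]
  simp only [Function.comp_apply, beq_iff_eq, Int.natCast_inj, PySem.Set.mem_ofList,
    List.mem_flatMap, count_flatMap, List.countP_eq_length, decide_eq_true_eq,
    List.mem_cons]
  constructor
  · rintro ⟨-, hall⟩
    refine ⟨hall e (Or.inl rfl), ?_⟩
    intro s hs
    rcases List.mem_map.mp hs with ⟨x, hx, rfl⟩
    exact hall x (Or.inr hx)
  · rintro ⟨h1, h2⟩
    have hall : ∀ a, (a = e ∨ a ∈ es) → v ∈ pvEdgeSet a := by
      rintro a (rfl | ha)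
      · exact h1
      · exact h2 _ (List.mem_map_of_mem ha)
    exact ⟨⟨e, Or.inl rfl, h1⟩, hall⟩

-- ===== VERDICT (by name: the statement is the Claim_ definition above) =====
theorem verifier_cliques_spec : Claim_equal_verifier_cliques := by
  intro cliques _ hpre
  show verifier_cliques cliques = verifier_cliques_alt cliques
  unfold verifier_cliques verifier_cliques_alt
  apply PySem.List.foldl_congr_mem
  intro acc clique_ hmem
  cases clique_ with
  | nil => exact absurd rfl (hpre [] hmem)
  | cons e es =>
    simp only [List.map_cons, counts_eq_counter]
    have h := values_count_eq e es
    rw [h]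
    by_cases h1 : ((es.map pvEdgeSet).foldl PySem.Set.inter (pvEdgeSet e)).length = 1
    · rw [if_pos h1, if_pos ⟨by intro h0; simp [h0] at h1, h1⟩]
    · rw [if_neg h1, if_neg (by rintro ⟨_, h2⟩; exact h1 h2)]
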